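-- pv_equiv track=rewrite | github.com/Vayuv1/gitbutler-demo | sb_ui.py | _find_attachment_point
-- ===== SOURCE A (Python) =====
-- def _find_attachment_point(existing: list[str], new: list[str]) -> int:
--     """Find where to splice new words to avoid duplicate regions."""
--     if not existing or not new:
--         return len(existing)
--
--     for length in range(len(new), 0, -1):
--         prefix = new[:length]
--         search = existing[-(len(new) + 10):]
--         for i in range(len(search)):
--             if search[i : i + length] == prefix:
--                 return len(existing) - len(search) + i
--     return len(existing)
-- ===== SOURCE B (Python) =====
-- def _lcp(xs, ys):
--     """Length of the longest common prefix of xs and ys."""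
--     n = 0
--     for a, b in zip(xs, ys):
--         if a != b:
--             break
--         n += 1
--     return n
--
--
-- def _find_attachment_point(existing: list[str], new: list[str]) -> int:
--     """Find where to splice new words to avoid duplicate regions.
--
--     Single pass: at each window position compute the longest common
--     prefix with `new`; take the maximum length, earliest position.
--     """
--     if not existing or not new:
--         return len(existing)
--
--     search = existing[-(len(new) + 10):]
--     best_len, best_i = 0, 0
--     for i in range(len(search)):
--         l = _lcp(search[i:], new)
--         if l > best_len:
--             best_len, best_i = l, i
--
--     if best_len == 0:
--         return len(existing)
--     return len(existing) - len(search) + best_i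
-- ===== Notes on version B (the rewrite author's own statement) =====
-- stated objective: faster
-- what changed: Replaces the descending loop over candidate prefix lengths (each re-scanning the whole window with slice comparisons) by a single pass that computes the longest-common-prefix length at each window position and keeps the maximum with earliest index.
import Mathlib
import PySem

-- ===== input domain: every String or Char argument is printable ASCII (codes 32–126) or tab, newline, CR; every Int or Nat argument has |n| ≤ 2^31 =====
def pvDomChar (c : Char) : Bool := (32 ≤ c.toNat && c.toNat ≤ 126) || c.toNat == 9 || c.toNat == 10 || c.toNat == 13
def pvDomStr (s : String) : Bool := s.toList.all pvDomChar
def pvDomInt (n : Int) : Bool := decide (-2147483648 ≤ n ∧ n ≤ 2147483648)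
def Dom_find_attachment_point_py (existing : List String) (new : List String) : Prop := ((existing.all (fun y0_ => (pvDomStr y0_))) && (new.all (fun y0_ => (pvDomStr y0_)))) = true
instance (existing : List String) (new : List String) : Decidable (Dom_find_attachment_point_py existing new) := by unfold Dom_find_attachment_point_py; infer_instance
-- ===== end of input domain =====

-- B replaces A's descending loop over prefix lengths (each re-scanning the window) by one
-- pass computing the longest-common-prefix at each window position (objective: faster).

-- ===== PORT A =====
def find_attachment_point_py (existing : List String) (new : List String) : Int :=
  if existing.isEmpty || new.isEmpty then (existing.length : Int)
  else
    match (PySem.List.pyRange (new.length : Int) 0 (-1)).findSome? (fun length =>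
      let pfx := PySem.List.slice new none (some length)
      let search := PySem.List.slice existing (some (-((new.length : Int) + 10))) none
      (PySem.List.pyRange 0 (search.length : Int) 1).findSome? (fun i =>
        if PySem.List.slice search (some i) (some (i + length)) = pfx
        then some ((existing.length : Int) - (search.length : Int) + i) else none)) with
    | some r => r
    | none => (existing.length : Int)

-- ===== PORT B =====
-- longest common prefix length (port of Source B's _lcp)
def pvLcp : List String → List String → Nat
  | x :: xs, y :: ys => if x = y then pvLcp xs ys + 1 else 0
  | _, _ => 0

def find_attachment_point_py_alt (existing : List String) (new : List String) : Int :=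
  if existing.isEmpty || new.isEmpty then (existing.length : Int)
  else
    let search := PySem.List.slice existing (some (-((new.length : Int) + 10))) none
    let best :=
      (List.range search.length).foldl (fun (st : Nat × Nat) i =>
        let l := pvLcp (search.drop i) new
        if st.1 < l then (l, i) else st) (0, 0)
    if best.1 = 0 then (existing.length : Int)
    else (existing.length : Int) - (search.length : Int) + (best.2 : Int)

-- ===== PRECONDITION & SPEC =====
def Spec_find_attachment_point_py (existing : List String) (new : List String) (out : Int) : Prop := out = find_attachment_point_py_alt existing new
instance (existing : List String) (new : List String) (out : Int) : Decidable (Spec_find_attachment_point_py existing new out) := by unfold Spec_find_attachment_point_py; infer_instance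

-- ===== CLAIM (what is proved, stated in full; the proofs are below) =====
def Claim_equal_find_attachment_point_py : Prop := ∀ (existing : List String) (new : List String), Dom_find_attachment_point_py existing new → Spec_find_attachment_point_py existing new (find_attachment_point_py existing new)

-- ===== LEMMAS AND PROOFS =====

theorem pvLcp_le_right (xs ys : List String) : pvLcp xs ys ≤ ys.length := by
  induction xs generalizing ys with
  | nil => simp [pvLcp]
  | cons x xs ih =>
    cases ys with
    | nil => simp [pvLcp]
    | cons y ys =>
      simp only [pvLcp]
      split_ifs
      · have := ih ys; simp; omega
      · simp

theorem le_pvLcp_iff (xs ys : List String) (k : Nat) :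
    k ≤ pvLcp xs ys ↔ k ≤ xs.length ∧ k ≤ ys.length ∧ xs.take k = ys.take k := by
  induction k generalizing xs ys with
  | zero => simp
  | succ k ih =>
    cases xs with
    | nil => simp [pvLcp]
    | cons x xs =>
      cases ys with
      | nil => simp [pvLcp]
      | cons y ys =>
        simp only [pvLcp, List.take_succ_cons, List.length_cons]
        split_ifs with hxy
        · subst hxy
          rw [Nat.succ_le_succ_iff, ih]
          constructor
          · rintro ⟨h1, h2, h3⟩; exact ⟨by omega, by omega, by rw [h3]⟩
          · rintro ⟨h1, h2, h3⟩
            exact ⟨by omega, by omega, by injection h3⟩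
        · constructor
          · intro h; exact absurd h (by simp)
          · rintro ⟨-, -, h3⟩; injection h3 with h3 _; exact absurd h3 hxy

-- the A-side slice condition is exactly "length ≤ lcp"
theorem cond_iff_le_lcp (s w : List String) (k L : Nat) (hL : L ≤ w.length) :
    ((s.drop k).take L = w.take L) ↔ L ≤ pvLcp (s.drop k) w := by
  rw [le_pvLcp_iff]
  constructor
  · intro h
    have hlen := congrArg List.length h
    rw [List.length_take, List.length_take] at hlen
    exact ⟨by omega, hL, h⟩
  · rintro ⟨-, -, h⟩; exact h

-- findSome? respects pointwise equality on members
theorem findSome?_congr' {α β : Type} (l : List α) (f g : α → Option β)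
    (h : ∀ x ∈ l, f x = g x) : l.findSome? f = l.findSome? g := by
  induction l with
  | nil => rfl
  | cons x xs ih =>
    simp only [List.findSome?_cons, h x (by simp)]
    cases g x with
    | some v => rfl
    | none => exact ih (fun y hy => h y (by simp [hy]))

-- findSome? of an if-some-none is find?-then-map
theorem findSome?_if_eq_find?_map {α β : Type} (l : List α) (p : α → Prop) [DecidablePred p] (g : α → β) :
    l.findSome? (fun x => if p x then some (g x) else none) = (l.find? (fun x => decide (p x))).map g := by
  induction l with
  | nil => simp
  | cons x xs ih =>
    by_cases h : p x <;> simp [List.findSome?, List.find?, h, ih]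

-- countdown findSome?: skip an initial none-segment
theorem countdown_skip {β : Type} (h : Int → Option β) (a L : Nat) (hL : L ≤ a)
    (hnone : ∀ K : Nat, L < K → K ≤ a → h (K : Int) = none) :
    (PySem.List.pyRange (a : Int) 0 (-1)).findSome? h
      = (PySem.List.pyRange (L : Int) 0 (-1)).findSome? h := by
  induction a with
  | zero =>
    have : L = 0 := by omega
    subst this; rfl
  | succ a ih =>
    rcases Nat.lt_or_ge L (a + 1) with hlt | hge
    · rw [PySem.List.pyRange_neg_one_cons (by push_cast; omega)]
      rw [List.findSome?_cons]
      have htop : h ((a : Int) + 1) = none := by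
        have := hnone (a + 1) (by omega) (by omega)
        push_cast at this
        exact this
      push_cast
      rw [htop]
      have hstep : ((a : Int) + 1 - 1) = (a : Int) := by ring
      rw [hstep]
      exact ih (by omega) (fun K h1 h2 => hnone K h1 (by omega))
    · have : L = a + 1 := by omega
      subst this; rfl

theorem countdown_none {β : Type} (h : Int → Option β) (a : Nat)
    (hnone : ∀ K : Nat, 0 < K → K ≤ a → h (K : Int) = none) :
    (PySem.List.pyRange (a : Int) 0 (-1)).findSome? h = none := by
  have := countdown_skip h a 0 (by omega) (fun K h1 h2 => hnone K h1 h2)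
  simpa using this

-- B's fold: characterization of (best length, best index)
theorem bfold_spec (f : Nat → Nat) (n : Nat) :
    ∃ bl bi, (List.range n).foldl (fun (st : Nat × Nat) i =>
        if st.1 < f i then (f i, i) else st) (0, 0) = (bl, bi) ∧
      ((bl = 0 ∧ bi = 0 ∧ ∀ k < n, f k = 0) ∨
       (bi < n ∧ 0 < bl ∧ f bi = bl ∧ (∀ k < n, f k ≤ bl) ∧ ∀ j < bi, f j < bl)) := by
  induction n with
  | zero => exact ⟨0, 0, rfl, Or.inl ⟨rfl, rfl, by omega⟩⟩
  | succ n ih =>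
    obtain ⟨bl, bi, hfold, hcase⟩ := ih
    rw [List.range_succ, List.foldl_append, hfold]
    simp only [List.foldl_cons, List.foldl_nil]
    by_cases h : bl < f n
    · refine ⟨f n, n, by simp [h], Or.inr ⟨by omega, by omega, rfl, ?_, ?_⟩⟩
      · intro k hk
        rcases Nat.lt_or_ge k n with hkn | hkn
        · rcases hcase with ⟨-, -, hall⟩ | ⟨-, -, -, hub, -⟩
          · rw [hall k hkn]; omega
          · have := hub k hkn; omega
        · have : k = n := by omega
          subst this; omega
      · intro j hj
        rcases hcase with ⟨-, -, hall⟩ | ⟨-, -, -, hub, -⟩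
        · rw [hall j hj]; omega
        · have := hub j hj; omega
    · refine ⟨bl, bi, by simp [h], ?_⟩
      rcases hcase with ⟨hbl, hbi, hall⟩ | ⟨h1, h2, h3, h4, h5⟩
      · left
        refine ⟨hbl, hbi, ?_⟩
        intro k hk
        rcases Nat.lt_or_ge k n with hkn | hkn
        · exact hall k hkn
        · have : k = n := by omega
          subst this; omega
      · right
        refine ⟨by omega, h2, h3, ?_, h5⟩
        intro k hk
        rcases Nat.lt_or_ge k n with hkn | hkn
        · exact h4 k hkn
        · have : k = n := by omega
          subst this; omega

-- the inner loop of A, rewritten as a Nat-indexed first-match search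
theorem inner_eq (s w : List String) (base : Int) (L : Nat) (hL : L ≤ w.length) :
    (PySem.List.pyRange 0 (s.length : Int) 1).findSome? (fun i =>
        if PySem.List.slice s (some i) (some (i + (L : Int))) = PySem.List.slice w none (some (L : Int))
        then some (base + i) else none)
      = ((List.range s.length).find? (fun k => decide (L ≤ pvLcp (s.drop k) w))).map
          (fun k => base + (k : Int)) := by
  rw [PySem.List.pyRange_one]
  simp only [Int.sub_zero, Int.toNat_natCast]
  rw [List.findSome?_map]
  rw [findSome?_congr' _ _
    (fun k : Nat => if L ≤ pvLcp (s.drop k) w then some (base + (k : Int)) else none)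
    (by
      intro k hk
      simp only [Function.comp, Int.zero_add]
      rw [PySem.List.slice_natCast_add, PySem.List.slice_to_natCast]
      rw [if_congr (cond_iff_le_lcp s w k L hL) rfl rfl])]
  rw [findSome?_if_eq_find?_map]
  cases (List.range s.length).find? (fun k => decide (L ≤ pvLcp (s.drop k) w)) <;> rfl

-- A's two nested loops compute exactly "earliest position of maximal lcp"
theorem core_eq (s w : List String) (base : Int) :
    (PySem.List.pyRange (w.length : Int) 0 (-1)).findSome? (fun length =>
      (PySem.List.pyRange 0 (s.length : Int) 1).findSome? (fun i =>
        if PySem.List.slice s (some i) (some (i + length)) = PySem.List.slice w none (some length)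
        then some (base + i) else none))
    = (if ((List.range s.length).foldl (fun (st : Nat × Nat) i =>
          if st.1 < pvLcp (s.drop i) w then (pvLcp (s.drop i) w, i) else st) (0, 0)).1 = 0
       then none
       else some (base + ((((List.range s.length).foldl (fun (st : Nat × Nat) i =>
          if st.1 < pvLcp (s.drop i) w then (pvLcp (s.drop i) w, i) else st) (0, 0)).2 : Nat) : Int))) := by
  obtain ⟨bl, bi, hfold, hcase⟩ := bfold_spec (fun k => pvLcp (s.drop k) w) s.length
  rw [hfold]
  rcases hcase with ⟨hbl, hbi, hall⟩ | ⟨h1, h2, h3, h4, h5⟩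
  · subst hbl
    rw [if_pos rfl]
    apply countdown_none
    intro K hK0 hKm
    rw [inner_eq s w base K hKm]
    rw [List.find?_range_eq_none.mpr]
    · rfl
    · intro k hk
      simp only [Bool.not_eq_eq_eq_not, Bool.not_true, decide_eq_false_iff_not]
      rw [hall k hk]
      omega
  · have hblm : bl ≤ w.length := h3 ▸ pvLcp_le_right _ _
    rw [countdown_skip _ w.length bl hblm]
    · rw [PySem.List.pyRange_neg_one_cons (by exact_mod_cast h2)]
      rw [List.findSome?_cons]
      rw [inner_eq s w base bl hblm]
      have hfind : (List.range s.length).find? (fun k => decide (bl ≤ pvLcp (s.drop k) w))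
          = some bi := by
        refine List.find?_range_eq_some.mpr ⟨by simp [h3], by simp [h1], ?_⟩
        intro j hj
        simp only [Bool.not_eq_eq_eq_not, Bool.not_true, decide_eq_false_iff_not]
        have := h5 j hj
        omega
      rw [hfind, if_neg (by omega)]
      rfl
    · intro K hK1 hK2
      rw [inner_eq s w base K hK2]
      rw [List.find?_range_eq_none.mpr]
      · rfl
      · intro k hk
        simp only [Bool.not_eq_eq_eq_not, Bool.not_true, decide_eq_false_iff_not]
        have := h4 k hk
        omega

theorem find_attachment_point_py_eq (existing new : List String) :
    find_attachment_point_py existing new = find_attachment_point_py_alt existing new := by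
  unfold find_attachment_point_py find_attachment_point_py_alt
  by_cases h : (existing.isEmpty || new.isEmpty) = true
  · rw [if_pos h, if_pos h]
  · rw [if_neg h, if_neg h]
    simp only []
    rw [core_eq (PySem.List.slice existing (some (-((new.length : Int) + 10))) none) new
      ((existing.length : Int) - ((PySem.List.slice existing (some (-((new.length : Int) + 10))) none).length : Int))]
    split_ifs with hbl
    · rfl
    · rfl

-- ===== VERDICT (by name: the statement is the Claim_ definition above) =====
theorem find_attachment_point_py_spec : Claim_equal_find_attachment_point_py := by
  intro existing new _
  unfold Spec_find_attachment_point_py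
  exact find_attachment_point_py_eq existing new
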